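-- pv_equiv track=rewrite | github.com/unanchoi/algo..itnayo | programmers/lv2/짝지어제거하기.py | solution
-- ===== SOURCE A (Python) =====
-- from collections import deque
--
-- def solution(w: str):
--     q = deque()
--
--     for i in range(len(w)):
--         if i == 0:
--             q.append(w[i])
--         else:
--             if len(q) > 0:
--                 if w[i] == q[-1]:
--                     q.pop()
--                 else:
--                     q.append(w[i])
--             else:
--                 q.append(w[i])
--
--     if len(q) == 0:
--         return 1
--     else:
--         return 0
-- ===== SOURCE B (Python) =====
-- def solution(w: str):
--     s = w
--     while True:
--         out = []
--         i = 0
--         while i < len(s):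
--             if i + 1 < len(s) and s[i] == s[i + 1]:
--                 i += 2
--             else:
--                 out.append(s[i])
--                 i += 1
--         r = ''.join(out)
--         if r == s:
--             break
--         s = r
--     return 1 if s == '' else 0
-- ===== Notes on version B (the rewrite author's own statement) =====
-- stated objective: alternative
-- what changed: Replaced the one-pass left-to-right stack (push/pop against the top) by a fixed-point loop of single scans that each delete non-overlapping adjacent equal pairs, repeated until a pass removes nothing; equivalence rests on confluence of pair removal.
import Mathlib
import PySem

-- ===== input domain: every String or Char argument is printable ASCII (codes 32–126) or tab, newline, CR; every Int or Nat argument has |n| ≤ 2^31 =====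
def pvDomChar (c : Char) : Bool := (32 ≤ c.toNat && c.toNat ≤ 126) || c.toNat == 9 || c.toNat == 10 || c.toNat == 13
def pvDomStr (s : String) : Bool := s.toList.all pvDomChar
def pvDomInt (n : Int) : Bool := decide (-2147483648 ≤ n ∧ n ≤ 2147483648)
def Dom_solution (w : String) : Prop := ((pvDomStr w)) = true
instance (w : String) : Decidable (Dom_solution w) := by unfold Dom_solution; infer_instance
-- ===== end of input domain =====

-- A = one-pass stack, B = fixed-point loop of pair-removal scans; same return value, B is a genuinely different reduction strategy (no speed claim).

-- ===== PORT A =====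
-- for i in range(len(w)) reading w[i]  ⇒  fold over enumerate(w); q is the deque (append/pop at the right end)
def solution (w : String) : Int :=
  let q := (PySem.List.enumerate w.toList 0).foldl
    (fun q ic =>
      if ic.1 = 0 then q ++ [ic.2]
      else if q.length > 0 then
        if PySem.List.pyGet? q (-1) = some ic.2 then q.dropLast else q ++ [ic.2]
      else q ++ [ic.2]) []
  if q.length = 0 then 1 else 0

-- ===== PORT B =====
-- one scan of Source B's inner while: keep s[i] unless s[i] == s[i+1], in which case skip both
def onePass : List Char → List Char
  | [] => []
  | [c] => [c]
  | a :: b :: rest => if a = b then onePass rest else a :: onePass (b :: rest)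

theorem onePass_length_le : ∀ s : List Char, (onePass s).length ≤ s.length := by
  intro s
  induction s using onePass.induct with
  | case1 => simp [onePass]
  | case2 c => simp [onePass]
  | case3 b rest ih => simp [onePass]; omega
  | case4 a b rest hne ih => simp [onePass, hne] at ih ⊢; omega

theorem onePass_ne_lt {s : List Char} (h : onePass s ≠ s) : (onePass s).length < s.length := by
  induction s using onePass.induct with
  | case1 => simp [onePass] at h
  | case2 c => simp [onePass] at h
  | case3 b rest ih =>
      have := onePass_length_le rest
      simp [onePass]; omega
  | case4 a b rest hne ih =>
      simp only [onePass, if_neg hne] at h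
      have h' : onePass (b :: rest) ≠ b :: rest := fun he => h (by rw [he])
      have h2 := ih h'
      simp only [onePass, if_neg hne, List.length_cons]
      simp only [List.length_cons] at h2 ⊢
      omega

-- the outer while-loop: repeat onePass until it removes nothing
def reduceFix (s : List Char) : List Char :=
  let r := onePass s
  if h : r = s then s else reduceFix r
termination_by s.length
decreasing_by exact onePass_ne_lt h

def solution_alt (w : String) : Int :=
  if reduceFix w.toList = [] then 1 else 0

-- ===== PRECONDITION & SPEC =====
def Spec_solution (w : String) (out : Int) : Prop := out = solution_alt w
instance (w : String) (out : Int) : Decidable (Spec_solution w out) := by unfold Spec_solution; infer_instance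

-- ===== CLAIM (what is proved, stated in full; the proofs are below) =====
def Claim_equal_solution : Prop := ∀ (w : String), Dom_solution w → Spec_solution w (solution w)

-- ===== LEMMAS AND PROOFS =====

-- head-based mirror of the stack step (proof artefact; the port keeps the right-end deque)
def rstep (t : List Char) (c : Char) : List Char :=
  match t with
  | d :: t' => if d = c then t' else c :: d :: t'
  | [] => [c]

theorem stepA_reverse (i : Int) (q : List Char) (c : Char) (h : i ≠ 0 ∨ q = []) :
    (if i = 0 then q ++ [c]
     else if q.length > 0 then
       if PySem.List.pyGet? q (-1) = some c then q.dropLast else q ++ [c]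
     else q ++ [c]).reverse = rstep q.reverse c := by
  rcases h with h | h
  · simp only [if_neg h]
    cases hq : q.reverse with
    | nil =>
        have : q = [] := by simpa using congrArg List.reverse hq
        subst this; simp [rstep]
    | cons d t =>
        have hq' : q = t.reverse ++ [d] := by
          have := congrArg List.reverse hq; simpa using this
        subst hq'
        rw [PySem.List.pyGet?_neg_one]
        by_cases hdc : d = c
        · simp [rstep, hdc]
        · simp [rstep, hdc]
  · subst h; simp [rstep]

-- rstep preserves pair-freeness, and cancels with itself on a pair-free stack
theorem rstep_chain {t : List Char} (h : List.IsChain (· ≠ ·) t) (c : Char) :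
    List.IsChain (· ≠ ·) (rstep t c) := by
  cases t with
  | nil => simp [rstep]
  | cons d t' =>
      by_cases hdc : d = c
      · simpa [rstep, hdc] using h.tail
      · simp only [rstep, if_neg hdc]
        exact List.isChain_cons_cons.mpr ⟨Ne.symm hdc, h⟩

theorem rstep_rstep {t : List Char} (h : List.IsChain (· ≠ ·) t) (c : Char) :
    rstep (rstep t c) c = t := by
  cases t with
  | nil => simp [rstep]
  | cons d t' =>
      by_cases hdc : d = c
      · subst hdc
        cases t' with
        | nil => simp [rstep]
        | cons e t'' =>
            have hde : d ≠ e := (List.isChain_cons_cons.mp h).1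
            simp [rstep, Ne.symm hde]
      · simp [rstep, hdc]

-- one scan of B does not change the stack
theorem foldl_rstep_onePass : ∀ (s : List Char) (t : List Char),
    List.IsChain (· ≠ ·) t → (onePass s).foldl rstep t = s.foldl rstep t := by
  intro s
  induction s using onePass.induct with
  | case1 => intro t _; rfl
  | case2 c => intro t _; rfl
  | case3 b rest ih =>
      intro t ht
      have e : onePass (b :: b :: rest) = onePass rest := by simp [onePass]
      rw [e, ih t ht, List.foldl_cons, List.foldl_cons, rstep_rstep ht]
  | case4 a b rest hne ih =>
      intro t ht
      simp only [onePass, if_neg hne, List.foldl_cons]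
      exact ih (rstep t a) (rstep_chain ht a)

-- a fixed point of onePass has no adjacent equal characters
theorem onePass_fix_chain : ∀ {s : List Char}, onePass s = s → List.IsChain (· ≠ ·) s := by
  intro s
  induction s using onePass.induct with
  | case1 => intro _; exact List.isChain_nil
  | case2 c => intro _; exact List.isChain_singleton c
  | case3 b rest ih =>
      intro h
      exfalso
      have hl := onePass_length_le rest
      have hlen : (onePass (b :: b :: rest)).length = (b :: b :: rest).length := by rw [h]
      simp [onePass] at hlen
      omega
  | case4 a b rest hne ih =>
      intro h
      simp only [onePass, if_neg hne, List.cons.injEq] at h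
      exact List.isChain_cons_cons.mpr ⟨hne, ih h.2⟩

-- the stack of a pair-free string is the string itself (reversed)
theorem foldl_rstep_chain : ∀ (s acc : List Char), List.IsChain (· ≠ ·) s →
    (∀ h, acc.head? = some h → s.head? ≠ some h) → s.foldl rstep acc = s.reverse ++ acc := by
  intro s
  induction s with
  | nil => intro acc _ _; simp
  | cons c rest ih =>
      intro acc hch hhd
      have hstep : rstep acc c = c :: acc := by
        cases acc with
        | nil => rfl
        | cons d t =>
            have : d ≠ c := by
              intro hdc; exact hhd d rfl (by simp [hdc])
            simp [rstep, this]
      simp only [List.foldl_cons, hstep]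
      rw [ih (c :: acc) hch.tail]
      · simp
      · intro h hh hs
        simp at hh
        subst hh
        cases rest with
        | nil => simp at hs
        | cons e t =>
            simp at hs
            exact (List.isChain_cons_cons.mp hch).1 hs.symm

theorem reduceFix_stack : ∀ s : List Char, (reduceFix s).foldl rstep [] = s.foldl rstep [] := by
  intro s
  induction s using reduceFix.induct with
  | case1 x r h => rw [reduceFix.eq_def]; simp [show onePass x = x from h]
  | case2 x r h ih =>
      rw [reduceFix.eq_def]
      rw [dif_neg (show ¬ onePass x = x from h)]
      rw [ih]
      exact foldl_rstep_onePass x [] List.isChain_nil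

theorem reduceFix_fix : ∀ s : List Char, onePass (reduceFix s) = reduceFix s := by
  intro s
  induction s using reduceFix.induct with
  | case1 x r h =>
      rw [reduceFix.eq_def]; simp [show onePass x = x from h]
  | case2 x r h ih =>
      rw [reduceFix.eq_def]
      rw [dif_neg (show ¬ onePass x = x from h)]
      exact ih

theorem reduceFix_eq_stack (s : List Char) : reduceFix s = (s.foldl rstep []).reverse := by
  have hch := onePass_fix_chain (reduceFix_fix s)
  have h1 : (reduceFix s).foldl rstep [] = (reduceFix s).reverse := by
    rw [foldl_rstep_chain _ [] hch (by intro h hh; simp at hh)]; simp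
  have h2 := reduceFix_stack s
  rw [h1] at h2
  rw [← h2]; simp

-- A's fold (on enumerated input) equals the mirrored stack
theorem foldl_A_enum : ∀ (xs : List Char) (k : Int) (q : List Char),
    (1 ≤ k ∨ (k = 0 ∧ q = [])) →
    ((PySem.List.enumerate xs k).foldl
      (fun q ic =>
        if ic.1 = 0 then q ++ [ic.2]
        else if q.length > 0 then
          if PySem.List.pyGet? q (-1) = some ic.2 then q.dropLast else q ++ [ic.2]
        else q ++ [ic.2]) q).reverse = xs.foldl rstep q.reverse := by
  intro xs
  induction xs with
  | nil => intro k q _; simp [PySem.List.enumerate_nil]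
  | cons c rest ih =>
      intro k q hk
      rw [PySem.List.enumerate_cons]
      simp only [List.foldl_cons]
      have hside : k ≠ 0 ∨ q = [] := by
        rcases hk with h | ⟨_, h⟩
        · exact Or.inl (by omega)
        · exact Or.inr h
      have hstep := stepA_reverse k q c hside
      have hk1 : (1 : Int) ≤ k + 1 := by rcases hk with h | ⟨h, _⟩ <;> omega
      rw [ih (k + 1) _ (Or.inl hk1), hstep]

theorem solution_eq (w : String) : solution w = solution_alt w := by
  unfold solution solution_alt
  have hA := foldl_A_enum w.toList 0 [] (Or.inr ⟨rfl, rfl⟩)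
  simp only [List.reverse_nil] at hA
  rw [reduceFix_eq_stack, ← hA]
  simp only []
  rcases h : ((PySem.List.enumerate w.toList 0).foldl
      (fun q ic =>
        if ic.1 = 0 then q ++ [ic.2]
        else if q.length > 0 then
          if PySem.List.pyGet? q (-1) = some ic.2 then q.dropLast else q ++ [ic.2]
        else q ++ [ic.2]) []) with q
  simp

-- ===== VERDICT (by name: the statement is the Claim_ definition above) =====
theorem solution_spec : Claim_equal_solution := by
  intro w _
  unfold Spec_solution
  exact solution_eq w
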